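-- pv_equiv track=rewrite | github.com/YudaiTamura/information-fluency-python | crop_triangles.py | my_solve
-- ===== SOURCE A (Python) =====
-- def my_solve(point):
-- 	Num = 0
-- 	for i in range(0,len(point)-2):
-- 		for j in range(i+1,len(point)-1):
-- 			for k in range(j+1,len(point)):
-- 				Gx = point[i][0]+point[j][0]+point[k][0] #x軸の値の合計
-- 				Gy = point[i][1]+point[j][1]+point[k][1] #y軸の値の合計
-- 				if Gx % 3 == 0: # xの重心が格子点上か判定
-- 					if Gy % 3 == 0: # yの重心が格子点上か判定
-- 						Num += 1 # 重心が格子点上にあるものの個数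
-- 	return Num
-- ===== SOURCE B (Python) =====
-- def my_solve(point):
-- 	# O(n): bucket points by coordinates mod 3; for each new point count, via the
-- 	# 9 residue classes, the ordered pairs of earlier points completing a triple
-- 	# whose centroid is a lattice point; halve the double count at the end.
-- 	cnt = {}
-- 	twice = 0
-- 	for (x, y) in point:
-- 		tx = (-x) % 3
-- 		ty = (-y) % 3
-- 		for a0 in range(3):
-- 			for a1 in range(3):
-- 				ca = cnt.get((a0, a1), 0)
-- 				b0 = (tx - a0) % 3
-- 				b1 = (ty - a1) % 3
-- 				if (b0, b1) == (a0, a1):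
-- 					twice += ca * (ca - 1)
-- 				else:
-- 					twice += ca * cnt.get((b0, b1), 0)
-- 		r = (x % 3, y % 3)
-- 		cnt[r] = cnt.get(r, 0) + 1
-- 	return twice // 2
-- ===== Notes on version B (the rewrite author's own statement) =====
-- stated objective: faster
-- what changed: Replaces the cubic scan over all index triples by a single pass that buckets points by coordinates mod 3 and counts, per new point, the ordered pairs of earlier points in the two complementary residue classes, halving the double count at the end.
import Mathlib
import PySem

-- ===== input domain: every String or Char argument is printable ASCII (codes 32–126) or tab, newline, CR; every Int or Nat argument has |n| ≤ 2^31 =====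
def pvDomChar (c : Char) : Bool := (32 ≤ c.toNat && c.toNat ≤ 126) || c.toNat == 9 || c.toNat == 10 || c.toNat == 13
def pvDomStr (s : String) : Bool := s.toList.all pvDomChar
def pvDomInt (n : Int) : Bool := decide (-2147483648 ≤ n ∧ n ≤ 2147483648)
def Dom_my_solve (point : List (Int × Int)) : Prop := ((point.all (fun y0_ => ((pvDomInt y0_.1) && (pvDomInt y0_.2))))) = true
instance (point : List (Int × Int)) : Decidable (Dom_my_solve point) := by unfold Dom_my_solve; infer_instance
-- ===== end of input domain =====

-- B replaces A's cubic scan over index triples by a linear pass over mod-3 residue buckets; equal return values are proved below.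

-- ===== PORT A =====
def my_solve (point : List (Int × Int)) : Int :=
  let n : Int := (point.length : Int)
  (PySem.List.pyRange 0 (n - 2)).foldl (fun Num i =>
    (PySem.List.pyRange (i + 1) (n - 1)).foldl (fun Num j =>
      (PySem.List.pyRange (j + 1) n).foldl (fun Num k =>
        let pi := PySem.List.pyGetD point i ((0 : Int), (0 : Int))
        let pj := PySem.List.pyGetD point j ((0 : Int), (0 : Int))
        let pk := PySem.List.pyGetD point k ((0 : Int), (0 : Int))
        let Gx := pi.1 + pj.1 + pk.1
        let Gy := pi.2 + pj.2 + pk.2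
        if PySem.Int.mod Gx 3 = 0 then
          if PySem.Int.mod Gy 3 = 0 then Num + 1 else Num
        else Num) Num) Num) 0

-- ===== PORT B =====
-- one step of Source B's main loop: count (doubly) the pairs of earlier points completing p, then bucket p
def stepB (st : Int × PySem.Dict (Int × Int) Int) (p : Int × Int) : Int × PySem.Dict (Int × Int) Int :=
  let x := p.1
  let y := p.2
  let cnt := st.2
  let tx := PySem.Int.mod (-x) 3
  let ty := PySem.Int.mod (-y) 3
  let twice := (PySem.List.pyRange 0 3).foldl (fun tw a0 =>
    (PySem.List.pyRange 0 3).foldl (fun tw a1 =>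
      let ca := cnt.getD (a0, a1) 0
      let b0 := PySem.Int.mod (tx - a0) 3
      let b1 := PySem.Int.mod (ty - a1) 3
      if (b0, b1) = (a0, a1) then tw + ca * (ca - 1)
      else tw + ca * cnt.getD (b0, b1) 0) tw) st.1
  let r := (PySem.Int.mod x 3, PySem.Int.mod y 3)
  (twice, cnt.insert r (cnt.getD r 0 + 1))

def my_solve_alt (point : List (Int × Int)) : Int :=
  PySem.Int.floordiv (point.foldl stepB (0, PySem.Dict.empty)).1 2

-- ===== PRECONDITION & SPEC =====
def Spec_my_solve (point : List (Int × Int)) (out : Int) : Prop := out = my_solve_alt point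
instance (point : List (Int × Int)) (out : Int) : Decidable (Spec_my_solve point out) := by unfold Spec_my_solve; infer_instance

-- ===== CLAIM (what is proved, stated in full; the proofs are below) =====
def Claim_equal_my_solve : Prop := ∀ (point : List (Int × Int)), Dom_my_solve point → Spec_my_solve point (my_solve point)

-- ===== LEMMAS AND PROOFS =====

/-- number of points w of the list with (s1,s2) + w ≡ (0,0) mod 3 componentwise -/
def cnt1 (s1 s2 : Int) : List (Int × Int) → Int
  | [] => 0
  | w :: t => (if (s1 + w.1) % 3 = 0 ∧ (s2 + w.2) % 3 = 0 then 1 else 0) + cnt1 s1 s2 t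

/-- number of index pairs j < k of the list whose sum together with z is ≡ (0,0) mod 3 -/
def pz (z : Int × Int) : List (Int × Int) → Int
  | [] => 0
  | q :: t => cnt1 (z.1 + q.1) (z.2 + q.2) t + pz z t

/-- number of index triples i < j < k of the list whose sum is ≡ (0,0) mod 3 -/
def cnt3 : List (Int × Int) → Int
  | [] => 0
  | p :: t => pz p t + cnt3 t

/-- number of points of the list whose mod-3 residue pair is a -/
def s1c (a : Int × Int) : List (Int × Int) → Int
  | [] => 0
  | q :: t => (if ((q.1 % 3, q.2 % 3) : Int × Int) = a then 1 else 0) + s1c a t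

/-- number of points w of the list with (q + w) ≡ t mod 3 componentwise -/
def cp (t q : Int × Int) : List (Int × Int) → Int
  | [] => 0
  | w :: l => (if (q.1 + w.1) % 3 = t.1 ∧ (q.2 + w.2) % 3 = t.2 then 1 else 0) + cp t q l

/-- number of index pairs of the list whose sum is ≡ t mod 3 componentwise -/
def pt (t : Int × Int) : List (Int × Int) → Int
  | [] => 0
  | q :: l => cp t q l + pt t l

def R3 : List Int := [0, 1, 2]

/-- the doubled pair count Source B's inner 3×3 loop adds, as a sum over the 9 residue classes -/
def G (t : Int × Int) (c : Int × Int → Int) : Int :=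
  (R3.map (fun a0 => (R3.map (fun a1 =>
     if (((t.1 - a0) % 3, (t.2 - a1) % 3) : Int × Int) = (a0, a1)
     then c (a0, a1) * (c (a0, a1) - 1)
     else c (a0, a1) * c ((t.1 - a0) % 3, (t.2 - a1) % 3))).sum)).sum

lemma mod3 (a : Int) : PySem.Int.mod a 3 = a % 3 :=
  PySem.Int.mod_eq_emod_of_pos (by norm_num)

-- ---------- A side: the three nested index loops compute cnt3 ----------

lemma a1 (point : List (Int × Int)) (s1 s2 : Int) :
    ∀ (m : Nat) (a : Int), 0 ≤ a → ((point.length : Int) - a).toNat = m → ∀ Num : Int,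
    (PySem.List.pyRange a (point.length : Int)).foldl (fun Num k =>
      if (s1 + (PySem.List.pyGetD point k ((0 : Int), (0 : Int))).1) % 3 = 0 then
        if (s2 + (PySem.List.pyGetD point k ((0 : Int), (0 : Int))).2) % 3 = 0 then Num + 1 else Num
      else Num) Num
    = Num + cnt1 s1 s2 (point.drop a.toNat) := by
  intro m
  induction m with
  | zero =>
    intro a ha hm Num
    rw [PySem.List.pyRange_one_eq_nil (by omega)]
    have hd : point.drop a.toNat = [] := List.drop_eq_nil_of_le (by omega)
    simp [hd, cnt1]
  | succ m ih =>
    intro a ha hm Num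
    have hlt : a < (point.length : Int) := by omega
    rw [PySem.List.pyRange_one_cons hlt, List.foldl_cons,
        PySem.List.pyGetD_eq_getElem point ((0:Int),(0:Int)) ha hlt,
        ih (a + 1) (by omega) (by omega),
        List.drop_eq_getElem_cons (show a.toNat < point.length by omega)]
    have h1 : (a + 1).toNat = a.toNat + 1 := by omega
    rw [h1]
    simp only [cnt1]
    split_ifs <;> first | tauto | ring

lemma pz_short (z : Int × Int) (l : List (Int × Int)) (h : l.length ≤ 1) : pz z l = 0 := by
  match l, h with
  | [], _ => rfl
  | [q], _ => simp [pz, cnt1]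

lemma cnt3_short (l : List (Int × Int)) (h : l.length ≤ 2) : cnt3 l = 0 := by
  match l, h with
  | [], _ => rfl
  | [p], _ => simp [cnt3, pz]
  | [p, q], _ => simp [cnt3, pz, cnt1]

lemma a2 (point : List (Int × Int)) (z : Int × Int) :
    ∀ (m : Nat) (a : Int), 0 ≤ a → ((point.length : Int) - 1 - a).toNat = m → ∀ Num : Int,
    (PySem.List.pyRange a ((point.length : Int) - 1)).foldl (fun Num j =>
      (PySem.List.pyRange (j + 1) (point.length : Int)).foldl (fun Num k =>
        if (z.1 + (PySem.List.pyGetD point j ((0 : Int), (0 : Int))).1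
              + (PySem.List.pyGetD point k ((0 : Int), (0 : Int))).1) % 3 = 0 then
          if (z.2 + (PySem.List.pyGetD point j ((0 : Int), (0 : Int))).2
                + (PySem.List.pyGetD point k ((0 : Int), (0 : Int))).2) % 3 = 0 then Num + 1 else Num
        else Num) Num) Num
    = Num + pz z (point.drop a.toNat) := by
  intro m
  induction m with
  | zero =>
    intro a ha hm Num
    rw [PySem.List.pyRange_one_eq_nil (by omega)]
    have hz : pz z (point.drop a.toNat) = 0 :=
      pz_short z _ (by rw [List.length_drop]; omega)
    simp [hz]
  | succ m ih =>
    intro a ha hm Num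
    have hlt1 : a < (point.length : Int) - 1 := by omega
    have hlt : a < (point.length : Int) := by omega
    rw [PySem.List.pyRange_one_cons hlt1, List.foldl_cons,
        a1 point _ _ (((point.length : Int) - (a + 1)).toNat) (a + 1) (by omega) rfl,
        ih (a + 1) (by omega) (by omega),
        List.drop_eq_getElem_cons (show a.toNat < point.length by omega)]
    have h1 : (a + 1).toNat = a.toNat + 1 := by omega
    rw [h1, PySem.List.pyGetD_eq_getElem point ((0:Int),(0:Int)) ha hlt]
    simp only [pz]
    ring

lemma a3 (point : List (Int × Int)) :
    ∀ (m : Nat) (a : Int), 0 ≤ a → ((point.length : Int) - 2 - a).toNat = m → ∀ Num : Int,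
    (PySem.List.pyRange a ((point.length : Int) - 2)).foldl (fun Num i =>
      (PySem.List.pyRange (i + 1) ((point.length : Int) - 1)).foldl (fun Num j =>
        (PySem.List.pyRange (j + 1) (point.length : Int)).foldl (fun Num k =>
          if ((PySem.List.pyGetD point i ((0 : Int), (0 : Int))).1
                + (PySem.List.pyGetD point j ((0 : Int), (0 : Int))).1
                + (PySem.List.pyGetD point k ((0 : Int), (0 : Int))).1) % 3 = 0 then
            if ((PySem.List.pyGetD point i ((0 : Int), (0 : Int))).2
                  + (PySem.List.pyGetD point j ((0 : Int), (0 : Int))).2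
                  + (PySem.List.pyGetD point k ((0 : Int), (0 : Int))).2) % 3 = 0 then Num + 1 else Num
          else Num) Num) Num) Num
    = Num + cnt3 (point.drop a.toNat) := by
  intro m
  induction m with
  | zero =>
    intro a ha hm Num
    rw [PySem.List.pyRange_one_eq_nil (by omega)]
    have hz : cnt3 (point.drop a.toNat) = 0 :=
      cnt3_short _ (by rw [List.length_drop]; omega)
    simp [hz]
  | succ m ih =>
    intro a ha hm Num
    have hlt2 : a < (point.length : Int) - 2 := by omega
    have hlt : a < (point.length : Int) := by omega
    rw [PySem.List.pyRange_one_cons hlt2, List.foldl_cons,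
        a2 point _ (((point.length : Int) - 1 - (a + 1)).toNat) (a + 1) (by omega) rfl,
        ih (a + 1) (by omega) (by omega),
        List.drop_eq_getElem_cons (show a.toNat < point.length by omega)]
    have h1 : (a + 1).toNat = a.toNat + 1 := by omega
    rw [h1, PySem.List.pyGetD_eq_getElem point ((0:Int),(0:Int)) ha hlt]
    simp only [cnt3]
    ring

lemma L_A (point : List (Int × Int)) : my_solve point = cnt3 point := by
  simp only [my_solve, mod3]
  rw [a3 point (((point.length : Int) - 2 - 0).toNat) 0 (le_refl 0) rfl 0]
  simp

-- ---------- B side: the residue-bucket pass computes 2 * cnt3 ----------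

lemma ite_add_shift {C : Prop} [Decidable C] (t x y : Int) :
    (if C then t + x else t + y) = t + (if C then x else y) := by
  split_ifs <;> rfl

lemma step_fst (tw : Int) (cnt : PySem.Dict (Int × Int) Int) (p : Int × Int) :
    (stepB (tw, cnt) p).1
    = tw + G ((-p.1) % 3, (-p.2) % 3) (fun a => cnt.getD a 0) := by
  have hr : PySem.List.pyRange 0 3 = [0, 1, 2] := by decide
  simp only [stepB, mod3, hr, List.foldl_cons, List.foldl_nil]
  simp only [ite_add_shift, G, R3, List.map_cons, List.map_nil, List.sum_cons, List.sum_nil]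
  ring

lemma step_snd (tw : Int) (cnt : PySem.Dict (Int × Int) Int) (p : Int × Int) :
    (stepB (tw, cnt) p).2
    = cnt.insert (p.1 % 3, p.2 % 3) (cnt.getD (p.1 % 3, p.2 % 3) 0 + 1) := by
  simp only [stepB, mod3]

set_option maxHeartbeats 1000000 in
lemma Ginc (t1 t2 u1 u2 : Int) (ht1 : 0 ≤ t1) (ht1' : t1 < 3) (ht2 : 0 ≤ t2) (ht2' : t2 < 3)
    (hu1 : 0 ≤ u1) (hu1' : u1 < 3) (hu2 : 0 ≤ u2) (hu2' : u2 < 3) (c : Int × Int → Int) :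
    G (t1, t2) (fun a => if a = (u1, u2) then c a + 1 else c a)
    = G (t1, t2) c + 2 * c ((t1 - u1) % 3, (t2 - u2) % 3) := by
  interval_cases t1 <;> interval_cases t2 <;> interval_cases u1 <;> interval_cases u2 <;>
    (norm_num [G, R3, Prod.mk.injEq]; ring)

lemma s1c_append (a : Int × Int) (l : List (Int × Int)) (z : Int × Int) :
    s1c a (l ++ [z]) = s1c a l + (if ((z.1 % 3, z.2 % 3) : Int × Int) = a then 1 else 0) := by
  induction l with
  | nil => simp [s1c]
  | cons q t ih => simp only [List.cons_append, s1c, ih]; ring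

lemma cp_eq (t1 t2 : Int) (ht1 : 0 ≤ t1) (ht1' : t1 < 3) (ht2 : 0 ≤ t2) (ht2' : t2 < 3)
    (q : Int × Int) (l : List (Int × Int)) :
    cp (t1, t2) q l = s1c ((t1 - q.1 % 3) % 3, (t2 - q.2 % 3) % 3) l := by
  induction l with
  | nil => rfl
  | cons w l ih =>
    simp only [cp, s1c, ih]
    congr 1
    apply if_congr _ rfl rfl
    rw [Prod.mk.injEq]
    constructor <;> intro h <;> omega

lemma Gid (t1 t2 : Int) (ht1 : 0 ≤ t1) (ht1' : t1 < 3) (ht2 : 0 ≤ t2) (ht2' : t2 < 3) :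
    ∀ l : List (Int × Int), G (t1, t2) (fun a => s1c a l) = 2 * pt (t1, t2) l := by
  intro l
  induction l with
  | nil => simp [G, R3, s1c, pt]
  | cons q l ih =>
    have hf : (fun a => s1c a (q :: l))
        = (fun a => if a = ((q.1 % 3, q.2 % 3) : Int × Int) then s1c a l + 1 else s1c a l) := by
      funext a
      simp only [s1c]
      by_cases h : a = ((q.1 % 3, q.2 % 3) : Int × Int) <;> simp [h, eq_comm, Int.add_comm]
    rw [hf,
        Ginc t1 t2 (q.1 % 3) (q.2 % 3) ht1 ht1' ht2 ht2'
          (Int.emod_nonneg _ (by norm_num)) (Int.emod_lt_of_pos _ (by norm_num))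
          (Int.emod_nonneg _ (by norm_num)) (Int.emod_lt_of_pos _ (by norm_num)),
        ih]
    simp only [pt, cp_eq t1 t2 ht1 ht1' ht2 ht2']
    ring

lemma cnt1_eq_cp (z q : Int × Int) (l : List (Int × Int)) :
    cnt1 (z.1 + q.1) (z.2 + q.2) l = cp (((-z.1) % 3, (-z.2) % 3) : Int × Int) q l := by
  induction l with
  | nil => rfl
  | cons w l ih =>
    simp only [cnt1, cp, ih]
    congr 1
    apply if_congr _ rfl rfl
    constructor <;> intro h <;> constructor <;> omega

lemma pz_pt (z : Int × Int) (l : List (Int × Int)) :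
    pz z l = pt (((-z.1) % 3, (-z.2) % 3) : Int × Int) l := by
  induction l with
  | nil => rfl
  | cons q l ih => simp only [pz, pt, ih, cnt1_eq_cp]

lemma cnt1_append (s1 s2 : Int) (l : List (Int × Int)) (z : Int × Int) :
    cnt1 s1 s2 (l ++ [z])
    = cnt1 s1 s2 l + (if (s1 + z.1) % 3 = 0 ∧ (s2 + z.2) % 3 = 0 then 1 else 0) := by
  induction l with
  | nil => simp [cnt1]
  | cons q t ih => simp only [List.cons_append, cnt1, ih]; ring

lemma pz_append (p : Int × Int) (l : List (Int × Int)) (z : Int × Int) :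
    pz p (l ++ [z]) = pz p l + cnt1 (p.1 + z.1) (p.2 + z.2) l := by
  induction l with
  | nil => simp [pz, cnt1]
  | cons q t ih =>
    simp only [List.cons_append, pz, ih, cnt1_append, cnt1]
    have hc : (if (p.1 + q.1 + z.1) % 3 = 0 ∧ (p.2 + q.2 + z.2) % 3 = 0 then (1:Int) else 0)
        = (if (p.1 + z.1 + q.1) % 3 = 0 ∧ (p.2 + z.2 + q.2) % 3 = 0 then (1:Int) else 0) := by
      apply if_congr _ rfl rfl
      constructor <;> intro h <;> constructor <;> omega
    rw [hc]
    ring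

lemma cnt3_append (l : List (Int × Int)) (z : Int × Int) :
    cnt3 (l ++ [z]) = cnt3 l + pz z l := by
  induction l with
  | nil => simp [cnt3, pz]
  | cons p t ih =>
    simp only [List.cons_append, cnt3, ih, pz_append, pz]
    have hc : cnt1 (p.1 + z.1) (p.2 + z.2) t = cnt1 (z.1 + p.1) (z.2 + p.2) t := by
      rw [show p.1 + z.1 = z.1 + p.1 from by ring, show p.2 + z.2 = z.2 + p.2 from by ring]
    rw [hc]
    ring

lemma Bmain : ∀ (rest pre : List (Int × Int)) (cnt : PySem.Dict (Int × Int) Int) (tw : Int),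
    (∀ a, cnt.getD a 0 = s1c a pre) → tw = 2 * cnt3 pre →
    (rest.foldl stepB (tw, cnt)).1 = 2 * cnt3 (pre ++ rest) := by
  intro rest
  induction rest with
  | nil => intro pre cnt tw _ htw; simpa using htw
  | cons z rest ih =>
    intro pre cnt tw hinv htw
    rw [List.foldl_cons,
        show stepB (tw, cnt) z
          = (tw + G ((-z.1) % 3, (-z.2) % 3) (fun a => cnt.getD a 0),
             cnt.insert (z.1 % 3, z.2 % 3) (cnt.getD (z.1 % 3, z.2 % 3) 0 + 1)) from
          Prod.ext (step_fst tw cnt z) (step_snd tw cnt z)]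
    have hres := ih (pre ++ [z])
      (cnt.insert (z.1 % 3, z.2 % 3) (cnt.getD (z.1 % 3, z.2 % 3) 0 + 1))
      (tw + G ((-z.1) % 3, (-z.2) % 3) (fun a => cnt.getD a 0))
      (by
        intro a
        rw [PySem.Dict.getD_insert, s1c_append]
        by_cases h : a = ((z.1 % 3, z.2 % 3) : Int × Int)
        · rw [if_pos h, if_pos h.symm, h, hinv]
        · rw [if_neg h, if_neg (fun hh => h (Eq.symm hh)), add_zero]
          exact hinv a)
      (by
        have hfun : (fun a => cnt.getD a 0) = (fun a => s1c a pre) := funext hinv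
        rw [hfun,
            Gid ((-z.1) % 3) ((-z.2) % 3)
              (Int.emod_nonneg _ (by norm_num)) (Int.emod_lt_of_pos _ (by norm_num))
              (Int.emod_nonneg _ (by norm_num)) (Int.emod_lt_of_pos _ (by norm_num)),
            ← pz_pt, cnt3_append, htw]
        ring)
    rw [hres]
    simp
lemma L_B (point : List (Int × Int)) : my_solve_alt point = cnt3 point := by
  have h := Bmain point [] PySem.Dict.empty 0
    (by intro a; simp [PySem.Dict.getD_empty, s1c]) (by simp [cnt3])
  simp only [List.nil_append] at h
  rw [my_solve_alt, h, PySem.Int.floordiv_eq_ediv_of_pos (by norm_num)]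
  omega

-- ===== VERDICT (by name: the statement is the Claim_ definition above) =====
theorem my_solve_spec : Claim_equal_my_solve := by
  intro point _
  unfold Spec_my_solve
  rw [L_A, L_B]
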